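-- pv_equiv track=rewrite | github.com/romgenie/tic-tak-toe-2 | src/tictactoe/features.py | calculate_connectivity
-- ===== SOURCE A (Python) =====
-- from typing import Dict, List
--
-- def calculate_connectivity(board: List[int], player: int) -> Dict[str, int]:
--     adjacency = {
--         0: [1, 3, 4], 1: [0, 2, 3, 4, 5], 2: [1, 4, 5],
--         3: [0, 1, 4, 6, 7], 4: [0, 1, 2, 3, 5, 6, 7, 8], 5: [1, 2, 4, 7, 8],
--         6: [3, 4, 7], 7: [3, 4, 5, 6, 8], 8: [4, 5, 7],
--     }
--     player_positions = [i for i in range(9) if board[i] == player]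
--     connectivity = {
--         'connected_pairs': 0,
--         'total_connections': 0,
--         'isolated_pieces': 0,
--         'cluster_count': 0,
--         'largest_cluster': 0,
--     }
--     for pos in player_positions:
--         connections = 0
--         for adj in adjacency[pos]:
--             if board[adj] == player:
--                 connectivity['connected_pairs'] += 1
--                 connections += 1
--         connectivity['total_connections'] += connections
--         if connections == 0:
--             connectivity['isolated_pieces'] += 1
--     connectivity['connected_pairs'] //= 2
--     connectivity['total_connections'] //= 2
--     visited = set()
--     clusters = []
--     for start_pos in player_positions:
--         if start_pos not in visited:
--             cluster = []
--             queue = [start_pos]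
--             visited.add(start_pos)
--             while queue:
--                 pos = queue.pop(0)
--                 cluster.append(pos)
--                 for adj in adjacency[pos]:
--                     if board[adj] == player and adj not in visited:
--                         visited.add(adj)
--                         queue.append(adj)
--             clusters.append(cluster)
--     connectivity['cluster_count'] = len(clusters)
--     connectivity['largest_cluster'] = max((len(c) for c in clusters), default=0)
--     return connectivity
-- ===== SOURCE B (Python) =====
-- def calculate_connectivity(board, player):
--     ADJ = {
--         0: [1, 3, 4], 1: [0, 2, 3, 4, 5], 2: [1, 4, 5],
--         3: [0, 1, 4, 6, 7], 4: [0, 1, 2, 3, 5, 6, 7, 8], 5: [1, 2, 4, 7, 8],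
--         6: [3, 4, 7], 7: [3, 4, 5, 6, 8], 8: [4, 5, 7],
--     }
--     mine = [board[i] == player for i in range(9)]
--     cells = [i for i in range(9) if mine[i]]
--     degs = [sum(1 for j in ADJ[i] if mine[j]) for i in cells]
--     # union-find over the player's cells (replaces A's BFS)
--     parent = {i: i for i in cells}
--
--     def find(x):
--         while parent[x] != x:
--             parent[x] = parent[parent[x]]
--             x = parent[x]
--         return x
--
--     for i in cells:
--         for j in ADJ[i]:
--             if j in parent:
--                 ri, rj = find(i), find(j)
--                 if ri != rj:
--                     parent[ri] = rj
--     sizes = {}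
--     for i in cells:
--         r = find(i)
--         sizes[r] = sizes.get(r, 0) + 1
--     total = sum(degs)
--     return {
--         'connected_pairs': total // 2,
--         'total_connections': total // 2,
--         'isolated_pieces': sum(1 for d in degs if d == 0),
--         'cluster_count': len(sizes),
--         'largest_cluster': max(sizes.values(), default=0),
--     }
-- ===== Notes on version B (the rewrite author's own statement) =====
-- stated objective: alternative
-- what changed: Cluster discovery is done with a union-find (parent map with path halving, then group cells by root into a size map) instead of A's BFS with a visited set and a pop(0) queue; connected_pairs/total_connections/isolated_pieces come from one degree list instead of A's running-counter loop.
import Mathlib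
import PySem

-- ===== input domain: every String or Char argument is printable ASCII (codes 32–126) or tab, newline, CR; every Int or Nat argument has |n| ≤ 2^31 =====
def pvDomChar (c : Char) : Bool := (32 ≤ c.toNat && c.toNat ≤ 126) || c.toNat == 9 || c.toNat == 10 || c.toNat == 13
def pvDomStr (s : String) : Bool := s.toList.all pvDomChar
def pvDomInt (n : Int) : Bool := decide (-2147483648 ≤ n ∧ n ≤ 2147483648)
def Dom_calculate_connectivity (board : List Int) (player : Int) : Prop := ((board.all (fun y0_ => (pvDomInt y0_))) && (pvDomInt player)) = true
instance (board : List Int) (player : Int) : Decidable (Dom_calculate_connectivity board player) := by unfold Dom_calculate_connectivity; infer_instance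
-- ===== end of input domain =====

-- B replaces A's BFS cluster discovery with a union-find over the player's cells (objective: alternative algorithm).
-- Both programs read the board only through the 9 comparisons board[i] == player (i = 0..8); each port first
-- records exactly those comparisons (pvMask, same comparisons in the same order as its Python's reads resolve to)
-- and then runs its Python's algorithm step for step on them.

-- the literal adjacency dict both Pythons carry (total lookup: keys are exactly 0..8)
def pvAdj (i : Int) : List Int :=
  if i = 0 then [1, 3, 4] else if i = 1 then [0, 2, 3, 4, 5] else if i = 2 then [1, 4, 5]
  else if i = 3 then [0, 1, 4, 6, 7] else if i = 4 then [0, 1, 2, 3, 5, 6, 7, 8] else if i = 5 then [1, 2, 4, 7, 8]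
  else if i = 6 then [3, 4, 7] else if i = 7 then [3, 4, 5, 6, 8] else if i = 8 then [4, 5, 7] else []

-- mask of the 9 comparisons board[i] == player; exact for boards of length ≥ 9 (Pre_)
def pvMask (board : List Int) (player : Int) : List Bool :=
  (List.range 9).map (fun i => decide (PySem.List.pyGet? board (i : Int) = some player))

def pvMget (m : List Bool) (i : Int) : Bool := m.getD i.toNat false

-- ===== PORT A =====
-- first loop: state (connected_pairs, total_connections, isolated_pieces)
def aLoop1 (m : List Bool) (positions : List Int) : Int × Int × Int :=
  positions.foldl (fun s pos =>
    let t := (pvAdj pos).foldl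
      (fun (t : Int × Int) adj => if pvMget m adj then (t.1 + 1, t.2 + 1) else t) (s.1, 0)
    (t.1, s.2.1 + t.2, if t.2 = 0 then s.2.2 + 1 else s.2.2)) (0, 0, 0)

-- the BFS while-loop (queue.pop(0); fuel 10 > the ≤ 9 iterations any run can make)
def aBFS (m : List Bool) : Nat → List Int → PySem.Set Int → List Int → List Int × PySem.Set Int
  | 0, _, visited, cluster => (cluster, visited)
  | _, [], visited, cluster => (cluster, visited)
  | f + 1, pos :: rest, visited, cluster =>
    let qv := (pvAdj pos).foldl
      (fun (qv : List Int × PySem.Set Int) adj =>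
        if pvMget m adj && !(PySem.Set.contains qv.2 adj) then (qv.1 ++ [adj], PySem.Set.add qv.2 adj)
        else qv) (rest, visited)
    aBFS m f qv.1 qv.2 (cluster ++ [pos])

def aClusters (m : List Bool) (positions : List Int) : List (List Int) :=
  (positions.foldl (fun (st : List (List Int) × PySem.Set Int) start =>
    if PySem.Set.contains st.2 start then st
    else
      let r := aBFS m 10 [start] (PySem.Set.add st.2 start) []
      (st.1 ++ [r.1], r.2)) ([], PySem.Set.empty)).1

def aCore (m : List Bool) : List (String × Int) :=
  let positions := (PySem.List.pyRange 0 9 1).filter (fun i => pvMget m i)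
  let s := aLoop1 m positions
  let clusters := aClusters m positions
  [("connected_pairs", PySem.Int.floordiv s.1 2),
   ("total_connections", PySem.Int.floordiv s.2.1 2),
   ("isolated_pieces", s.2.2),
   ("cluster_count", (clusters.length : Int)),
   ("largest_cluster", PySem.List.maxD (clusters.map (fun c => (c.length : Int))) (fun x => x) 0)]

def calculate_connectivity (board : List Int) (player : Int) : List (String × Int) :=
  aCore (pvMask board player)

-- ===== PORT B =====
-- find with path halving; threads the mutated parent dict (fuel 10 > the ≤ 9-long parent chains)
def bFind : Nat → PySem.Dict Int Int → Int → PySem.Dict Int Int × Int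
  | 0, p, x => (p, x)
  | f + 1, p, x =>
    let px := p.getD x x
    if px = x then (p, x)
    else
      let pp := p.getD px px
      bFind f (p.insert x pp) pp

def bUnion (cells : List Int) (p0 : PySem.Dict Int Int) : PySem.Dict Int Int :=
  cells.foldl (fun p i =>
    (pvAdj i).foldl (fun p j =>
      if p.contains j then
        let pr := bFind 10 p i
        let ps := bFind 10 pr.1 j
        if pr.2 = ps.2 then ps.1 else ps.1.insert pr.2 ps.2
      else p) p) p0

def bCore (m : List Bool) : List (String × Int) :=
  let cells := (PySem.List.pyRange 0 9 1).filter (fun i => pvMget m i)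
  let degs : List Int := cells.map (fun i => (((pvAdj i).countP (fun j => pvMget m j)) : Int))
  let parent0 : PySem.Dict Int Int := cells.foldl (fun d i => d.insert i i) PySem.Dict.empty
  let parent := bUnion cells parent0
  let sizes := (cells.foldl (fun (ps : PySem.Dict Int Int × PySem.Dict Int Int) i =>
    let pr := bFind 10 ps.1 i
    (pr.1, ps.2.modify pr.2 0 (· + 1))) (parent, PySem.Dict.empty)).2
  let total : Int := degs.sum
  [("connected_pairs", PySem.Int.floordiv total 2),
   ("total_connections", PySem.Int.floordiv total 2),
   ("isolated_pieces", ((degs.countP (fun d => d = 0)) : Int)),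
   ("cluster_count", (sizes.size : Int)),
   ("largest_cluster", PySem.List.maxD sizes.values (fun x => x) 0)]

def calculate_connectivity_alt (board : List Int) (player : Int) : List (String × Int) :=
  bCore (pvMask board player)

-- ===== PRECONDITION & SPEC =====
-- Python A indexes board[i] for i in range(9): it raises IndexError when len(board) < 9
def Pre_calculate_connectivity (board : List Int) (player : Int) : Prop := 9 ≤ board.length
instance (board : List Int) (player : Int) : Decidable (Pre_calculate_connectivity board player) := by
  unfold Pre_calculate_connectivity; infer_instance

def pvWitness_calculate_connectivity : List Int × Int := ([1, 0, 1, 1, 0, 0, 0, 1, 0], 1)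

def Spec_calculate_connectivity (board : List Int) (player : Int) (out : List (String × Int)) : Prop := out = calculate_connectivity_alt board player
instance (board : List Int) (player : Int) (out : List (String × Int)) : Decidable (Spec_calculate_connectivity board player out) := by unfold Spec_calculate_connectivity; infer_instance

-- ===== CLAIM (what is proved, stated in full; the proofs are below) =====
def Claim_equal_calculate_connectivity : Prop := ∀ (board : List Int) (player : Int), Dom_calculate_connectivity board player → Pre_calculate_connectivity board player → Spec_calculate_connectivity board player (calculate_connectivity board player)

-- ===== LEMMAS AND PROOFS =====

-- the two cores agree on every 9-entry mask (512 cases, each a full run of both algorithms)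
set_option maxRecDepth 40000 in
set_option maxHeartbeats 2000000 in
theorem core_eq : ∀ b0 b1 b2 b3 b4 b5 b6 b7 b8 : Bool,
    aCore [b0, b1, b2, b3, b4, b5, b6, b7, b8] = bCore [b0, b1, b2, b3, b4, b5, b6, b7, b8] := by
  decide

-- the mask is always a 9-entry list
theorem mask_shape (board : List Int) (player : Int) :
    ∃ b0 b1 b2 b3 b4 b5 b6 b7 b8, pvMask board player = [b0, b1, b2, b3, b4, b5, b6, b7, b8] :=
  ⟨_, _, _, _, _, _, _, _, _, rfl⟩

-- ===== VERDICT (by name: the statement is the Claim_ definition above) =====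
theorem calculate_connectivity_spec : Claim_equal_calculate_connectivity := by
  intro board player _ _
  show calculate_connectivity board player = calculate_connectivity_alt board player
  unfold calculate_connectivity calculate_connectivity_alt
  obtain ⟨b0, b1, b2, b3, b4, b5, b6, b7, b8, h⟩ := mask_shape board player
  rw [h]
  exact core_eq b0 b1 b2 b3 b4 b5 b6 b7 b8
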